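-- pv_equiv track=rewrite | github.com/garbidge/adventofcode | 2023/22.py | fallers
-- ===== SOURCE A (Python) =====
-- from copy import deepcopy
--
-- def fallers(reversemap, val):
--     clone = deepcopy(reversemap)
--     for x in clone:
--         clone[x] = [v for v in clone[x] if v != val]
--     fallen = set()
--     changed = 99
--     while changed > 0:
--         changed = 0
--         for x in clone:
--             if x not in fallen and len(clone[x]) == 0:
--                 fallen.add(x)
--                 changed += 1
--         for x in clone:
--             clone[x] = [v for v in clone[x] if v not in fallen]
--     return len(fallen)
-- ===== SOURCE B (Python) =====
-- def fallers(reversemap, val):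
--     # Iterate the monotone operator F(S) = {x : every supporter of x is val or in S}
--     # from the empty set until it stabilises (at most len(reversemap)+1 rounds),
--     # recomputing it from scratch each round instead of mutating a cloned map.
--     items = list(reversemap.items())
--     cur = frozenset()
--     for _ in range(len(items) + 1):
--         nxt = frozenset(x for x, sup in items
--                         if all(v == val or v in cur for v in sup))
--         if nxt == cur:
--             break
--         cur = nxt
--     return len(cur)
-- ===== Notes on version B (the rewrite author's own statement) =====
-- stated objective: alternative
-- what changed: A clones the map and repeatedly mutates it (filtering fallen supporters out of every list) while counting additions with a 'changed' flag; B instead iterates a pure monotone step operator F(S) = {x : every supporter of x is val or in S} from the empty set, recomputing it from scratch each round until it stabilises (bounded by len(reversemap)+1 rounds).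
import Mathlib
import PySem

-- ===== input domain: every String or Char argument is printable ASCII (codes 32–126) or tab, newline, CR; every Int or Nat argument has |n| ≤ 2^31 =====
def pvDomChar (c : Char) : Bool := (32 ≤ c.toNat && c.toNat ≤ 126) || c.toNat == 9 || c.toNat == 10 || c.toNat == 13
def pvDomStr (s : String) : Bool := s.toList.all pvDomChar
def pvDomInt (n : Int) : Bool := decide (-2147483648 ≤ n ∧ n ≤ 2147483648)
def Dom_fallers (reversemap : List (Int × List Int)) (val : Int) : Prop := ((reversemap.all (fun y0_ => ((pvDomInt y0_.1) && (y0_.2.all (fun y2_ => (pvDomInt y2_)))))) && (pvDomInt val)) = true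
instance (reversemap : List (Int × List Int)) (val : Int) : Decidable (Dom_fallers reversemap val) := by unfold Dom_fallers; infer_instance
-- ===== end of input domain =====

-- B replaces A's mutate-a-cloned-map / changed-counter fixpoint loop by pure bounded
-- iteration of a from-scratch monotone step operator (objective: alternative; not faster).


-- ===== PORT A =====
-- 'for x in clone: if x not in fallen and len(clone[x]) == 0: fallen.add(x); changed += 1'
-- (iterates the dict's pairs; exact since a dict's keys are distinct)
def fallersPass1 (clone : List (Int × List Int)) (fallen : PySem.Set Int) : PySem.Set Int × Int :=
  clone.foldl
    (fun st kv =>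
      if !(PySem.Set.contains st.1 kv.1) && kv.2.isEmpty then (PySem.Set.add st.1 kv.1, st.2 + 1)
      else st)
    (fallen, 0)

-- 'for x in clone: clone[x] = [v for v in clone[x] if v not in fallen]'
def fallersPass2 (clone : List (Int × List Int)) (fallen : PySem.Set Int) : List (Int × List Int) :=
  clone.map (fun kv => (kv.1, kv.2.filter (fun v => !(PySem.Set.contains fallen v))))

-- 'while changed > 0': fuel bound — every iteration that keeps the loop alive adds at least
-- one of the ≤ reversemap.length distinct keys to fallen, so reversemap.length + 1 iterations
-- always reach the iteration with changed = 0; the fuel-0 branch is never taken.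
-- (pass 2 is pure, so computing it only when the loop continues is the same computation.)
def fallersLoop (fuel : Nat) (clone : List (Int × List Int)) (fallen : PySem.Set Int) : PySem.Set Int :=
  match fuel with
  | 0 => fallen
  | fuel + 1 =>
    let st := fallersPass1 clone fallen
    if st.2 > 0 then fallersLoop fuel (fallersPass2 clone st.1) st.1 else st.1

def fallers (reversemap : List (Int × List Int)) (val : Int) : Int :=
  -- clone = deepcopy(reversemap); for x in clone: clone[x] = [v for v in clone[x] if v != val]
  let clone := reversemap.map (fun kv => (kv.1, kv.2.filter (fun v => !(v == val))))
  PySem.Set.len (fallersLoop (reversemap.length + 1) clone PySem.Set.empty)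

-- ===== PORT B =====
-- 'frozenset(x for x, sup in items if all(v == val or v in cur for v in sup))'
def fallersStep (items : List (Int × List Int)) (val : Int) (cur : PySem.Set Int) : PySem.Set Int :=
  PySem.Set.ofList
    ((items.filter (fun kv => kv.2.all (fun v => v == val || PySem.Set.contains cur v))).map Prod.fst)

-- 'for _ in range(len(items) + 1): nxt = …; if nxt == cur: break; cur = nxt'
def fallersAltLoop (items : List (Int × List Int)) (val : Int) (fuel : Nat) (cur : PySem.Set Int) :
    PySem.Set Int :=
  match fuel with
  | 0 => cur
  | fuel + 1 =>
    let nxt := fallersStep items val cur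
    if PySem.Set.equal nxt cur then cur else fallersAltLoop items val fuel nxt

def fallers_alt (reversemap : List (Int × List Int)) (val : Int) : Int :=
  PySem.Set.len (fallersAltLoop reversemap val (reversemap.length + 1) PySem.Set.empty)

-- ===== PRECONDITION & SPEC =====
def Spec_fallers (reversemap : List (Int × List Int)) (val : Int) (out : Int) : Prop := out = fallers_alt reversemap val
instance (reversemap : List (Int × List Int)) (val : Int) (out : Int) : Decidable (Spec_fallers reversemap val out) := by unfold Spec_fallers; infer_instance

-- ===== CLAIM (what is proved, stated in full; the proofs are below) =====
def Claim_equal_fallers : Prop := ∀ (reversemap : List (Int × List Int)) (val : Int), Dom_fallers reversemap val → Spec_fallers reversemap val (fallers reversemap val)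

-- ===== LEMMAS AND PROOFS =====

-- The common mathematical model: the step operator and its iterates from ∅.
def pvStep (rm : List (Int × List Int)) (val : Int) (S : List Int) : List Int :=
  (rm.filter (fun kv => kv.2.all (fun v => v == val || PySem.Set.contains S v))).map Prod.fst

def pvIter (rm : List (Int × List Int)) (val : Int) : Nat → List Int
  | 0 => []
  | k + 1 => pvStep rm val (pvIter rm val k)

lemma mem_pvStep (rm : List (Int × List Int)) (val : Int) (S : List Int) (x : Int) :
    x ∈ pvStep rm val S ↔ ∃ kv ∈ rm, kv.1 = x ∧ ∀ v ∈ kv.2, v = val ∨ v ∈ S := by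
  simp [pvStep, List.mem_map, List.mem_filter, List.all_eq_true, PySem.Set.contains]

lemma pvStep_congr (rm : List (Int × List Int)) (val : Int) (S T : List Int)
    (h : ∀ y, y ∈ S ↔ y ∈ T) (x : Int) : x ∈ pvStep rm val S ↔ x ∈ pvStep rm val T := by
  simp only [mem_pvStep]
  constructor
  · rintro ⟨kv, hkv, rfl, hall⟩
    exact ⟨kv, hkv, rfl, fun v hv => (hall v hv).imp id (h v).mp⟩
  · rintro ⟨kv, hkv, rfl, hall⟩
    exact ⟨kv, hkv, rfl, fun v hv => (hall v hv).imp id (h v).mpr⟩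

lemma pvIter_mono (rm : List (Int × List Int)) (val : Int) :
    ∀ k x, x ∈ pvIter rm val k → x ∈ pvIter rm val (k + 1) := by
  intro k
  induction k with
  | zero => intro x hx; simp [pvIter] at hx
  | succ k ih =>
    intro x hx
    rw [pvIter, mem_pvStep] at hx ⊢
    obtain ⟨kv, hkv, rfl, hall⟩ := hx
    exact ⟨kv, hkv, rfl, fun v hv => (hall v hv).imp id (ih v)⟩

lemma pvIter_stab (rm : List (Int × List Int)) (val : Int) (k : Nat)
    (h : ∀ x, x ∈ pvIter rm val (k + 1) ↔ x ∈ pvIter rm val k) :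
    ∀ m, k ≤ m → ∀ x, x ∈ pvIter rm val m ↔ x ∈ pvIter rm val k := by
  intro m hm
  induction m, hm using Nat.le_induction with
  | base => exact fun x => Iff.rfl
  | succ m hm ih =>
    intro x
    rw [show m + 1 = (m) + 1 from rfl, pvIter]
    rw [pvStep_congr rm val _ _ ih x]
    rw [← pvIter]
    exact h x


-- A's pass 1 with a general initial counter (proof helper; fallersPass1 clone fallen = pvP1 clone fallen 0).
def pvP1 (clone : List (Int × List Int)) (fallen : PySem.Set Int) (c : Int) : PySem.Set Int × Int :=
  clone.foldl
    (fun st kv =>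
      if !(PySem.Set.contains st.1 kv.1) && kv.2.isEmpty then (PySem.Set.add st.1 kv.1, st.2 + 1)
      else st)
    (fallen, c)

lemma fallersPass1_eq_pvP1 (clone : List (Int × List Int)) (fallen : PySem.Set Int) :
    fallersPass1 clone fallen = pvP1 clone fallen 0 := rfl

lemma pvP1_fst_mem :
    ∀ (clone : List (Int × List Int)) (fallen : PySem.Set Int) (c : Int) (x : Int),
      x ∈ (pvP1 clone fallen c).1 ↔ x ∈ fallen ∨ ∃ kv ∈ clone, kv.1 = x ∧ kv.2 = [] := by
  intro clone
  induction clone with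
  | nil => intro fallen c x; simp [pvP1]
  | cons kv rest ih =>
    intro fallen c x
    rw [pvP1, List.foldl_cons]
    by_cases hc : (!(PySem.Set.contains fallen kv.1) && kv.2.isEmpty) = true
    · rw [if_pos hc]
      rw [show (rest.foldl _ _) = pvP1 rest (PySem.Set.add fallen kv.1) (c + 1) from rfl, ih]
      simp only [Bool.and_eq_true, Bool.not_eq_true', List.isEmpty_iff] at hc
      simp only [PySem.Set.mem_add, List.mem_cons]
      constructor
      · rintro (( hx | rfl) | ⟨kv', h1, h2, h3⟩)
        · exact Or.inl hx
        · exact Or.inr ⟨kv, Or.inl rfl, rfl, hc.2⟩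
        · exact Or.inr ⟨kv', Or.inr h1, h2, h3⟩
      · rintro (hx | ⟨kv', (rfl | h1), h2, h3⟩)
        · exact Or.inl (Or.inl hx)
        · exact Or.inl (Or.inr h2.symm)
        · exact Or.inr ⟨kv', h1, h2, h3⟩
    · rw [if_neg hc]
      rw [show (rest.foldl _ _) = pvP1 rest fallen c from rfl, ih]
      simp only [Bool.and_eq_true, Bool.not_eq_true', List.isEmpty_iff, not_and] at hc
      simp only [List.mem_cons]
      constructor
      · rintro (hx | ⟨kv', h1, h2, h3⟩)
        · exact Or.inl hx
        · exact Or.inr ⟨kv', Or.inr h1, h2, h3⟩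
      · rintro (hx | ⟨kv', (rfl | h1), h2, h3⟩)
        · exact Or.inl hx
        · -- kv itself is empty: then the guard failed because kv.1 ∈ fallen
          have hct : PySem.Set.contains fallen kv'.1 = true := by
            cases hb : PySem.Set.contains fallen kv'.1
            · exact absurd h3 (hc hb)
            · rfl
          exact Or.inl (h2 ▸ ((PySem.Set.contains_iff fallen kv'.1).mp hct))
        · exact Or.inr ⟨kv', h1, h2, h3⟩

lemma pvP1_fst_nodup :
    ∀ (clone : List (Int × List Int)) (fallen : PySem.Set Int) (c : Int),
      fallen.Nodup → (pvP1 clone fallen c).1.Nodup := by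
  intro clone
  induction clone with
  | nil => intro fallen c h; simpa [pvP1] using h
  | cons kv rest ih =>
    intro fallen c h
    rw [pvP1, List.foldl_cons]
    by_cases hc : (!(PySem.Set.contains fallen kv.1) && kv.2.isEmpty) = true
    · rw [if_pos hc]
      exact ih (PySem.Set.add fallen kv.1) (c + 1) (PySem.Set.nodup_add fallen kv.1 h)
    · rw [if_neg hc]
      exact ih fallen c h

lemma pvP1_snd_ge :
    ∀ (clone : List (Int × List Int)) (fallen : PySem.Set Int) (c : Int),
      c ≤ (pvP1 clone fallen c).2 := by
  intro clone
  induction clone with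
  | nil => intro fallen c; simp [pvP1]
  | cons kv rest ih =>
    intro fallen c
    rw [pvP1, List.foldl_cons]
    by_cases hc : (!(PySem.Set.contains fallen kv.1) && kv.2.isEmpty) = true
    · rw [if_pos hc]
      show c ≤ (pvP1 rest (PySem.Set.add fallen kv.1) (c + 1)).2
      have := ih (PySem.Set.add fallen kv.1) (c + 1)
      omega
    · rw [if_neg hc]
      exact ih fallen c

lemma pvP1_snd_eq :
    ∀ (clone : List (Int × List Int)) (fallen : PySem.Set Int) (c : Int),
      (pvP1 clone fallen c).2 = c → (pvP1 clone fallen c).1 = fallen := by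
  intro clone
  induction clone with
  | nil => intro fallen c _; simp [pvP1]
  | cons kv rest ih =>
    intro fallen c h
    rw [pvP1, List.foldl_cons] at h ⊢
    by_cases hc : (!(PySem.Set.contains fallen kv.1) && kv.2.isEmpty) = true
    · rw [if_pos hc] at h
      have h' : (pvP1 rest (PySem.Set.add fallen kv.1) (c + 1)).2 = c := h
      have := pvP1_snd_ge rest (PySem.Set.add fallen kv.1) (c + 1)
      omega
    · rw [if_neg hc] at h ⊢
      exact ih fallen c h

-- The shape of A's cloned dict after any number of rounds.
def pvCloneOf (rm : List (Int × List Int)) (val : Int) (fallen : PySem.Set Int) :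
    List (Int × List Int) :=
  rm.map (fun kv => (kv.1, kv.2.filter (fun v => !(v == val) && !(PySem.Set.contains fallen v))))

lemma pvCloneOf_empty (rm : List (Int × List Int)) (val : Int) :
    rm.map (fun kv => (kv.1, kv.2.filter (fun v => !(v == val)))) =
      pvCloneOf rm val PySem.Set.empty := by
  simp [pvCloneOf, PySem.Set.empty, PySem.Set.contains]

lemma pvPass2_cloneOf (rm : List (Int × List Int)) (val : Int)
    (fallen fallen' : PySem.Set Int) (hsub : ∀ y, y ∈ fallen → y ∈ fallen') :
    fallersPass2 (pvCloneOf rm val fallen) fallen' = pvCloneOf rm val fallen' := by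
  simp only [fallersPass2, pvCloneOf, List.map_map]
  apply List.map_congr_left
  intro kv _
  simp only [Function.comp_apply, List.filter_filter]
  congr 1
  apply List.filter_congr
  intro v _
  by_cases h' : v ∈ fallen'
  · simp [h']
  · have hf : v ∉ fallen := fun hv => h' (hsub v hv)
    simp [h', hf]

-- One pass-1 round on pvCloneOf computes one more iterate of the step operator.
lemma pvRound_mem (rm : List (Int × List Int)) (val : Int) (fallen : PySem.Set Int)
    (j : Nat) (hmem : ∀ x, x ∈ fallen ↔ x ∈ pvIter rm val j) (x : Int) :
    x ∈ (fallersPass1 (pvCloneOf rm val fallen) fallen).1 ↔ x ∈ pvIter rm val (j + 1) := by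
  rw [fallersPass1_eq_pvP1, pvP1_fst_mem]
  have hstep : (∃ kv ∈ pvCloneOf rm val fallen, kv.1 = x ∧ kv.2 = []) ↔
      x ∈ pvStep rm val fallen := by
    rw [mem_pvStep]
    simp only [pvCloneOf, List.mem_map]
    constructor
    · rintro ⟨kv, ⟨kv0, hkv0, rfl⟩, rfl, h3⟩
      refine ⟨kv0, hkv0, rfl, fun v hv => ?_⟩
      rw [List.filter_eq_nil_iff] at h3
      have := h3 v hv
      by_cases hval : v = val
      · exact Or.inl hval
      · right
        rw [← PySem.Set.contains_iff]
        simpa [hval] using this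
    · rintro ⟨kv0, hkv0, rfl, hall⟩
      refine ⟨_, ⟨kv0, hkv0, rfl⟩, rfl, ?_⟩
      rw [List.filter_eq_nil_iff]
      intro v hv
      rcases hall v hv with rfl | hmem'
      · simp
      · simp [hmem']
  rw [hstep]
  rw [show pvIter rm val (j + 1) = pvStep rm val (pvIter rm val j) from rfl]
  rw [pvStep_congr rm val fallen (pvIter rm val j) hmem x]
  constructor
  · rintro (hx | hx)
    · exact pvIter_mono rm val j x ((hmem x).mp hx)
    · exact hx
  · exact Or.inr

-- A's whole loop lands on the (j + fuel)-th iterate.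
lemma pvLoopA_spec (rm : List (Int × List Int)) (val : Int) :
    ∀ (fuel j : Nat) (fallen : PySem.Set Int), fallen.Nodup →
      (∀ x, x ∈ fallen ↔ x ∈ pvIter rm val j) →
      (fallersLoop fuel (pvCloneOf rm val fallen) fallen).Nodup ∧
        (∀ x, x ∈ fallersLoop fuel (pvCloneOf rm val fallen) fallen ↔
          x ∈ pvIter rm val (j + fuel)) := by
  intro fuel
  induction fuel with
  | zero => intro j fallen hn hm; exact ⟨hn, by simpa using hm⟩
  | succ fuel ih =>
    intro j fallen hn hm
    rw [fallersLoop]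
    have hmem' := pvRound_mem rm val fallen j hm
    have hnd' : (fallersPass1 (pvCloneOf rm val fallen) fallen).1.Nodup := by
      rw [fallersPass1_eq_pvP1]; exact pvP1_fst_nodup _ fallen 0 hn
    by_cases hch : (fallersPass1 (pvCloneOf rm val fallen) fallen).2 > 0
    · rw [if_pos hch]
      have hsub : ∀ y, y ∈ fallen → y ∈ (fallersPass1 (pvCloneOf rm val fallen) fallen).1 := by
        intro y hy
        exact (hmem' y).mpr (pvIter_mono rm val j y ((hm y).mp hy))
      rw [pvPass2_cloneOf rm val fallen _ hsub]
      have := ih (j + 1) _ hnd' hmem'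
      refine ⟨this.1, fun x => ?_⟩
      rw [(this.2 x)]
      ring_nf
    · rw [if_neg hch]
      -- changed = 0: pass 1 added nothing, the iterates have stabilised at j
      have hz : (fallersPass1 (pvCloneOf rm val fallen) fallen).2 = 0 := by
        have := pvP1_snd_ge (pvCloneOf rm val fallen) fallen 0
        rw [fallersPass1_eq_pvP1]
        rw [fallersPass1_eq_pvP1] at hch
        omega
      have hfix : (fallersPass1 (pvCloneOf rm val fallen) fallen).1 = fallen := by
        rw [fallersPass1_eq_pvP1] at hz ⊢
        exact pvP1_snd_eq _ fallen 0 hz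
      have hstab : ∀ x, x ∈ pvIter rm val (j + 1) ↔ x ∈ pvIter rm val j := by
        intro x
        rw [← hmem' x, hfix, hm x]
      refine ⟨hfix ▸ hnd', fun x => ?_⟩
      rw [hfix, hm x, ← pvIter_stab rm val j hstab (j + (fuel + 1)) (by omega) x]

-- B's whole loop lands on the (j + fuel)-th iterate.
lemma pvLoopB_spec (rm : List (Int × List Int)) (val : Int) :
    ∀ (fuel j : Nat) (cur : PySem.Set Int), cur.Nodup →
      (∀ x, x ∈ cur ↔ x ∈ pvIter rm val j) →
      (fallersAltLoop rm val fuel cur).Nodup ∧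
        (∀ x, x ∈ fallersAltLoop rm val fuel cur ↔ x ∈ pvIter rm val (j + fuel)) := by
  intro fuel
  induction fuel with
  | zero => intro j cur hn hm; exact ⟨hn, by simpa using hm⟩
  | succ fuel ih =>
    intro j cur hn hm
    rw [fallersAltLoop]
    have hmem' : ∀ x, x ∈ fallersStep rm val cur ↔ x ∈ pvIter rm val (j + 1) := by
      intro x
      rw [show fallersStep rm val cur = PySem.Set.ofList (pvStep rm val cur) from rfl]
      rw [PySem.Set.mem_ofList]
      rw [pvStep_congr rm val cur (pvIter rm val j) hm x]
      exact Iff.rfl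
    by_cases heq : PySem.Set.equal (fallersStep rm val cur) cur = true
    · rw [if_pos heq]
      have hstab : ∀ x, x ∈ pvIter rm val (j + 1) ↔ x ∈ pvIter rm val j := by
        intro x
        rw [← hmem' x, (PySem.Set.equal_iff _ _).mp heq x, hm x]
      refine ⟨hn, fun x => ?_⟩
      rw [hm x, ← pvIter_stab rm val j hstab (j + (fuel + 1)) (by omega) x]
    · rw [if_neg heq]
      have hnd' : (fallersStep rm val cur).Nodup := PySem.Set.nodup_ofList _
      have := ih (j + 1) _ hnd' hmem'
      refine ⟨this.1, fun x => ?_⟩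
      rw [this.2 x]
      ring_nf

-- ===== VERDICT (by name: the statement is the Claim_ definition above) =====
theorem fallers_spec : Claim_equal_fallers := by
  intro rm val _hdom
  unfold Spec_fallers fallers fallers_alt
  rw [pvCloneOf_empty]
  have h0 : ∀ x, x ∈ (PySem.Set.empty : PySem.Set Int) ↔ x ∈ pvIter rm val 0 := by
    intro x; simp [PySem.Set.empty, pvIter]
  have hA := pvLoopA_spec rm val (rm.length + 1) 0 PySem.Set.empty List.nodup_nil h0
  have hB := pvLoopB_spec rm val (rm.length + 1) 0 PySem.Set.empty List.nodup_nil h0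
  have hperm : (fallersLoop (rm.length + 1) (pvCloneOf rm val PySem.Set.empty) PySem.Set.empty).Perm
      (fallersAltLoop rm val (rm.length + 1) PySem.Set.empty) := by
    rw [List.perm_ext_iff_of_nodup hA.1 hB.1]
    intro x
    rw [hA.2 x, hB.2 x]
  simp only [PySem.Set.len]
  exact_mod_cast hperm.length_eq
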